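-- pv_equiv track=rewrite | github.com/giacomoverardo/FMM-Head | src/utils/fmm.py | get_wave_indexes_circular
-- ===== SOURCE A (Python) =====
-- from typing import List, Dict
--
-- def get_fmm_num_parameters_circular(num_leads:int, num_waves:int=5)->List[int]:
--     num_parameters_per_wave = (num_leads +num_leads*2 + 2 + 1) # For alpha and beta we have 2x parameters
--     num_parameters = num_parameters_per_wave*num_waves + num_leads #Add also n parameters for parameter M
--     return num_parameters, num_parameters_per_wave
--
-- def get_A_indexes_circular(wave_index:int, num_leads:int, num_waves:int=5):
--     num_parameters, num_parameters_per_wave = get_fmm_num_parameters_circular(num_leads=num_leads,num_waves=num_waves)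
--     start_index = num_parameters_per_wave * wave_index
--     end_index = start_index + num_leads
--     return start_index, end_index
--
-- def get_alpha_indexes_circular(wave_index:int, num_leads:int, num_waves:int=5):
--     num_parameters, num_parameters_per_wave = get_fmm_num_parameters_circular(num_leads=num_leads,num_waves=num_waves)
--     start_index = num_parameters_per_wave * wave_index + num_leads
--     end_index = start_index + 2
--     return start_index, end_index
--
-- def get_beta_indexes_circular(wave_index:int, num_leads:int, num_waves:int=5):
--     num_parameters, num_parameters_per_wave = get_fmm_num_parameters_circular(num_leads=num_leads,num_waves=num_waves)
--     start_index = num_parameters_per_wave * wave_index + num_leads + 2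
--     end_index = start_index + num_leads*2
--     return start_index, end_index
--
-- def get_omega_indexes_circular(wave_index:int, num_leads:int, num_waves:int=5):
--     num_parameters, num_parameters_per_wave = get_fmm_num_parameters_circular(num_leads=num_leads,num_waves=num_waves)
--     start_index = num_parameters_per_wave * wave_index + num_leads + 2 + num_leads*2
--     end_index = start_index + 1
--     return start_index, end_index
--
-- def get_wave_indexes_circular(wave_index:int, num_leads:int, num_waves:int=5)->List:
--     wave_indexes = []
--     for c,f in zip(["A","Alpha","Beta","Omega"],
--                    [get_A_indexes_circular,get_alpha_indexes_circular,
--                     get_beta_indexes_circular,get_omega_indexes_circular]):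
--         start_index,end_index=f(wave_index=wave_index,num_leads=num_leads,num_waves=num_waves)
--         c_index_list = list(range(start_index,end_index))
--         wave_indexes.extend(c_index_list)
--     return wave_indexes
-- ===== SOURCE B (Python) =====
-- def get_wave_indexes_circular(wave_index: int, num_leads: int, num_waves: int = 5):
--     # The A/Alpha/Beta/Omega segments are contiguous and together span
--     # exactly num_parameters_per_wave = 3*num_leads + 3 positions.
--     npw = 3 * num_leads + 3
--     return list(range(npw * wave_index, npw * (wave_index + 1)))
-- ===== Notes on version B (the rewrite author's own statement) =====
-- stated objective: simpler
-- what changed: B replaces the four helper dispatches and the accumulate-and-extend loop with one closed-form range of width 3*num_leads+3; Pre_ restricts to the natural domain 0 <= num_leads, since with a negative lead count A's concatenation of partly-empty, partly-backwards segments is an accident of the segment arithmetic and not a contiguous index block.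
-- outside the precondition, e.g. on get_wave_indexes_circular(0, -1, 5): A returns [-1, 0, -1], B returns []
import Mathlib
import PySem

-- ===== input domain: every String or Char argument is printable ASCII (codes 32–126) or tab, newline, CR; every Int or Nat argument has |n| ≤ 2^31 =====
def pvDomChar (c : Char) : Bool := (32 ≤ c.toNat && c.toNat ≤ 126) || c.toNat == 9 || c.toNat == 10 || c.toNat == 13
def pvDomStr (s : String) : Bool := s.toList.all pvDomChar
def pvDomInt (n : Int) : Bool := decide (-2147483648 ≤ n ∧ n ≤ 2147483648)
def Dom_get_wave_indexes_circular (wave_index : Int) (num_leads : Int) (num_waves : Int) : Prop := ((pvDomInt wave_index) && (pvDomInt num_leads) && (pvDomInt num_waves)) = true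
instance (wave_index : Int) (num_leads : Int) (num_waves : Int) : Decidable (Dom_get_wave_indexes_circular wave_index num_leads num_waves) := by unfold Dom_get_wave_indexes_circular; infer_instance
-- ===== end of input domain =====

-- B replaces A's four segment-helper dispatches and accumulate-and-extend loop with one
-- closed-form range of width 3*num_leads+3 (objective: simpler).

-- ===== PORT A =====
def get_fmm_num_parameters_circular (num_leads : Int) (num_waves : Int) : Int × Int :=
  let num_parameters_per_wave := num_leads + num_leads * 2 + 2 + 1
  let num_parameters := num_parameters_per_wave * num_waves + num_leads
  (num_parameters, num_parameters_per_wave)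

def get_A_indexes_circular (wave_index : Int) (num_leads : Int) (num_waves : Int) : Int × Int :=
  let p := get_fmm_num_parameters_circular num_leads num_waves
  let start_index := p.2 * wave_index
  (start_index, start_index + num_leads)

def get_alpha_indexes_circular (wave_index : Int) (num_leads : Int) (num_waves : Int) : Int × Int :=
  let p := get_fmm_num_parameters_circular num_leads num_waves
  let start_index := p.2 * wave_index + num_leads
  (start_index, start_index + 2)

def get_beta_indexes_circular (wave_index : Int) (num_leads : Int) (num_waves : Int) : Int × Int :=
  let p := get_fmm_num_parameters_circular num_leads num_waves
  let start_index := p.2 * wave_index + num_leads + 2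
  (start_index, start_index + num_leads * 2)

def get_omega_indexes_circular (wave_index : Int) (num_leads : Int) (num_waves : Int) : Int × Int :=
  let p := get_fmm_num_parameters_circular num_leads num_waves
  let start_index := p.2 * wave_index + num_leads + 2 + num_leads * 2
  (start_index, start_index + 1)

def get_wave_indexes_circular (wave_index : Int) (num_leads : Int) (num_waves : Int) : List Int :=
  (List.zip ["A", "Alpha", "Beta", "Omega"]
            [get_A_indexes_circular, get_alpha_indexes_circular,
             get_beta_indexes_circular, get_omega_indexes_circular]).foldl
    (fun wave_indexes cf =>
      let se := cf.2 wave_index num_leads num_waves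
      wave_indexes ++ PySem.List.pyRange se.1 se.2 1) []

-- ===== PORT B =====
def get_wave_indexes_circular_alt (wave_index : Int) (num_leads : Int) (num_waves : Int) : List Int :=
  let npw := 3 * num_leads + 3
  PySem.List.pyRange (npw * wave_index) (npw * (wave_index + 1)) 1

-- ===== PRECONDITION & SPEC =====
-- Pre_ restricts to the natural domain 0 ≤ num_leads (a lead count): with a negative
-- num_leads, A still returns, but its concatenation of partly-empty, partly-backwards
-- segments is an accident of the segment arithmetic, not a contiguous index block.
def Pre_get_wave_indexes_circular (wave_index : Int) (num_leads : Int) (num_waves : Int) : Prop := 0 ≤ num_leads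
instance (wave_index : Int) (num_leads : Int) (num_waves : Int) : Decidable (Pre_get_wave_indexes_circular wave_index num_leads num_waves) := by unfold Pre_get_wave_indexes_circular; infer_instance

def pvWitness_get_wave_indexes_circular : Int × Int × Int := (1, 2, 5)

def Spec_get_wave_indexes_circular (wave_index : Int) (num_leads : Int) (num_waves : Int) (out : List Int) : Prop := out = get_wave_indexes_circular_alt wave_index num_leads num_waves
instance (wave_index : Int) (num_leads : Int) (num_waves : Int) (out : List Int) : Decidable (Spec_get_wave_indexes_circular wave_index num_leads num_waves out) := by unfold Spec_get_wave_indexes_circular; infer_instance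

-- ===== CLAIM (what is proved, stated in full; the proofs are below) =====
def Claim_equal_get_wave_indexes_circular : Prop := ∀ (wave_index : Int) (num_leads : Int) (num_waves : Int), Dom_get_wave_indexes_circular wave_index num_leads num_waves → Pre_get_wave_indexes_circular wave_index num_leads num_waves → Spec_get_wave_indexes_circular wave_index num_leads num_waves (get_wave_indexes_circular wave_index num_leads num_waves)

-- ===== LEMMAS AND PROOFS =====

-- ===== VERDICT (by name: the statement is the Claim_ definition above) =====
theorem get_wave_indexes_circular_spec : Claim_equal_get_wave_indexes_circular := by
  intro wi nl nw _ hpre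
  have hnl : (0:Int) ≤ nl := hpre
  unfold Spec_get_wave_indexes_circular get_wave_indexes_circular get_wave_indexes_circular_alt
  simp only [get_A_indexes_circular, get_alpha_indexes_circular, get_beta_indexes_circular,
    get_omega_indexes_circular, get_fmm_num_parameters_circular, List.zip, List.zipWith,
    List.foldl, List.nil_append]
  rw [show (3 * nl + 3) * (wi + 1) = (nl + nl * 2 + 2 + 1) * wi + nl + 2 + nl * 2 + 1 by ring,
      show (3 * nl + 3) * wi = (nl + nl * 2 + 2 + 1) * wi by ring]
  set s := (nl + nl * 2 + 2 + 1) * wi with hs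
  rw [PySem.List.pyRange_one_append s (s + nl) (s + nl + 2 + nl * 2 + 1) (by omega) (by omega),
      PySem.List.pyRange_one_append (s + nl) (s + nl + 2) (s + nl + 2 + nl * 2 + 1) (by omega) (by omega),
      PySem.List.pyRange_one_append (s + nl + 2) (s + nl + 2 + nl * 2) (s + nl + 2 + nl * 2 + 1) (by omega) (by omega)]
  simp [List.append_assoc]
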